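-- pv_equiv track=rewrite | github.com/Raminyazdani/HW_all_maktab-78 | HWK2/excersizes/EX_4.py | algorythm_zip
-- ===== SOURCE A (Python) =====
-- def algorythm_zip(number: str) -> str:
--     test = number
--     # dict can store keys numbers and repeats
--     numbers_dict = dict()
--     for digit in test:
--         numbers_dict[digit] = numbers_dict.get(digit, 0) + 1
--
--     numbers = list(numbers_dict.keys())
--     repeats = list(map(lambda x: str(x), filter(lambda x: x > 1, numbers_dict.values())))
--     # making result
--     result = []
--     result.extend(repeats)
--     result.extend(numbers)
--     result.sort()
--     result = "".join(result)
--
--     # reccursive test for final result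
--     if test == result:
--         return result
--     else:
--         return algorythm_zip(result)
-- ===== SOURCE B (Python) =====
-- def _runs(chars):
--     # run-length encode an already-sorted list of characters, recursively
--     if not chars:
--         return []
--     c = chars[0]
--     rest = chars[1:]
--     i = 0
--     while i < len(rest) and rest[i] == c:
--         i += 1
--     return [(c, i + 1)] + _runs(rest[i:])
--
--
-- def algorythm_zip(number: str) -> str:
--     current = number
--     while True:
--         groups = _runs(sorted(current))
--         parts = [c for c, k in groups] + [str(k) for c, k in groups if k > 1]
--         result = "".join(sorted(parts))
--         if result == current:
--             return result
--         current = result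
-- ===== Notes on version B (the rewrite author's own statement) =====
-- stated objective: alternative
-- what changed: Replaces the tail recursion with a while-loop and the frequency dict with sort-then-group: each step sorts the characters and run-length-groups equal neighbours to get the distinct characters and their multiplicities, instead of building an insertion-ordered dict and reading its keys and filtered values.
import Mathlib
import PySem

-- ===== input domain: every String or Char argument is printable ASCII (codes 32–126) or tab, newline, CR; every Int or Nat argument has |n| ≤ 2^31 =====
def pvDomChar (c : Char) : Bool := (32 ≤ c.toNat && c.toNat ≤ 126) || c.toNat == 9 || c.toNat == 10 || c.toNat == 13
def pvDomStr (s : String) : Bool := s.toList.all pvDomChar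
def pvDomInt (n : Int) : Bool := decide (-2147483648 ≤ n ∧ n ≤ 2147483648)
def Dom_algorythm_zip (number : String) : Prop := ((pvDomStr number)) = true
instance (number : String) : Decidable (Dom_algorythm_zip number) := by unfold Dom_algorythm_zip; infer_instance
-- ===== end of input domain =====

-- B replaces A's recursion-with-a-frequency-dict by a while-loop whose step SORTS the characters first and
-- run-length-groups equal neighbours (sort-then-group instead of hash counting); same return value, objective: alternative.
-- Both ports use the same fuel bound 3*len+5 as the totality device for the fixed-point iteration
-- (each step either shortens the string or reaches the fixed point within a few same-length steps,
-- so the bound is never reached on any input).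

-- ===== PORT A =====
-- literal port of A: recursive; dict counting (insertion order), keys + filtered stringified values,
-- combined list sorted and joined, recurse until result == test
def algorythm_zip_go : Nat → String → String
  | 0, test => test
  | (fuel+1), test =>
    let digits := test.toList.map (fun c => String.ofList [c])
    let numbers_dict := List.foldl
      (fun d x => PySem.Dict.insert d x (PySem.Dict.getD d x 0 + 1))
      (PySem.Dict.empty : PySem.Dict String Int) digits
    let numbers := PySem.Dict.keys numbers_dict
    let repeats := (List.filter (fun x => decide (1 < x)) (PySem.Dict.values numbers_dict)).map PySem.Int.toStr
    let result := PySem.Str.join "" (PySem.List.sorted (repeats ++ numbers) (fun x => x) false)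
    if test = result then result else algorythm_zip_go fuel result

def algorythm_zip (number : String) : String :=
  algorythm_zip_go (3 * number.toList.length + 5) number

-- ===== PORT B =====
-- _runs: run-length encode an already-sorted list (the head's run counted with takeWhile/dropWhile,
-- mirroring Source B's leading-equal while-loop and recursive tail)
def pvRuns : List String → List (String × Int)
  | [] => []
  | c :: rest =>
    (c, ((rest.takeWhile (· == c)).length : Int) + 1) :: pvRuns (rest.dropWhile (· == c))
  termination_by l => l.length
  decreasing_by
    exact Nat.lt_succ_of_le (List.length_dropWhile_le _ _)

-- literal port of B: while-loop; per step sort the characters, run-length-group them,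
-- emit each run's character plus its count when > 1, sort the parts and join
def algorythm_zip_alt_go : Nat → String → String
  | 0, current => current
  | (fuel+1), current =>
    let groups := pvRuns (PySem.List.sorted (current.toList.map (fun c => String.ofList [c])) (fun x => x) false)
    let parts := groups.map (fun p => p.1)
      ++ (groups.filter (fun p => decide (1 < p.2))).map (fun p => PySem.Int.toStr p.2)
    let result := PySem.Str.join "" (PySem.List.sorted parts (fun x => x) false)
    if result = current then result else algorythm_zip_alt_go fuel result

def algorythm_zip_alt (number : String) : String :=
  algorythm_zip_alt_go (3 * number.toList.length + 5) number

-- ===== PRECONDITION & SPEC =====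
def Spec_algorythm_zip (number : String) (out : String) : Prop := out = algorythm_zip_alt number
instance (number : String) (out : String) : Decidable (Spec_algorythm_zip number out) := by unfold Spec_algorythm_zip; infer_instance

-- ===== CLAIM (what is proved, stated in full; the proofs are below) =====
def Claim_equal_algorythm_zip : Prop := ∀ (number : String), Dom_algorythm_zip number → Spec_algorythm_zip number (algorythm_zip number)

-- ===== LEMMAS AND PROOFS =====

-- in a ≤-sorted list whose elements all dominate c, dropping the leading c-run leaves no c
lemma pv_not_mem_dropWhile (c : String) : ∀ (t : List String), t.Pairwise (· ≤ ·) →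
    (∀ x ∈ t, c ≤ x) → c ∉ t.dropWhile (· == c) := by
  intro t
  induction t with
  | nil => intro _ _ h; simp at h
  | cons x t ih =>
    intro hp hle
    rcases List.pairwise_cons.1 hp with ⟨hxle, hpt⟩
    by_cases hx : x = c
    · subst hx
      rw [List.dropWhile_cons_of_pos (by simp)]
      exact ih hpt (fun y hy => hle y (List.mem_cons_of_mem _ hy))
    · rw [List.dropWhile_cons_of_neg (by simpa using fun h => hx h)]
      intro hc
      rcases List.mem_cons.1 hc with h | h
      · exact hx h.symm
      · exact hx (le_antisymm (hxle c h) (hle x (List.mem_cons_self)))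

-- discarding c from set(run ++ rst) when run is all-c and rst is c-free is set(rst)
lemma pv_discard_ofList_append (c : String) : ∀ (run rst : List String),
    (∀ x ∈ run, x = c) → c ∉ rst →
    PySem.Set.discard (PySem.Set.ofList (run ++ rst)) c = PySem.Set.ofList rst := by
  intro run
  induction run with
  | nil =>
    intro rst _ hnot
    rw [List.nil_append]
    simp only [PySem.Set.discard]
    apply List.filter_eq_self.2
    intro a ha
    have : a ≠ c := fun h => hnot (h ▸ (PySem.Set.mem_ofList rst a).1 ha)
    simpa using this
  | cons a run' ih =>
    intro rst hall hnot
    have ha : a = c := hall a (List.mem_cons_self)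
    subst ha
    rw [List.cons_append, PySem.Set.ofList_cons]
    simp only [PySem.Set.discard] at *
    rw [List.filter_cons_of_neg (by simp), List.filter_filter]
    rw [← ih rst (fun x hx => hall x (List.mem_cons_of_mem _ hx)) hnot]
    apply List.filter_congr
    intro x _
    simp [Bool.and_self]

-- run-length groups of a ≤-sorted list are exactly its distinct elements with their counts
lemma pvRuns_sorted_eq : ∀ (l : List String), l.Pairwise (· ≤ ·) →
    pvRuns l = (PySem.Set.ofList l).map (fun d => (d, (List.count d l : Int))) := by
  intro l
  induction l using pvRuns.induct with
  | case1 => intro _; simp [pvRuns]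
  | case2 c rest ih =>
    intro hp
    rcases List.pairwise_cons.1 hp with ⟨hcle, hrest⟩
    have hsub : (rest.dropWhile (· == c)).Pairwise (· ≤ ·) :=
      hrest.sublist (List.dropWhile_sublist _)
    have hnot : c ∉ rest.dropWhile (· == c) := pv_not_mem_dropWhile c rest hrest hcle
    have hrun : ∀ x ∈ rest.takeWhile (· == c), x = c := by
      intro x hx
      exact eq_of_beq (List.mem_takeWhile_imp (p := fun y => y == c) hx)
    have hsplit : rest.takeWhile (· == c) ++ rest.dropWhile (· == c) = rest :=
      List.takeWhile_append_dropWhile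
    have h1 : List.count c (rest.takeWhile (· == c)) = (rest.takeWhile (· == c)).length :=
      List.count_eq_length.2 (fun b hb => (hrun b hb).symm)
    have h2 : List.count c (rest.dropWhile (· == c)) = 0 := List.count_eq_zero.2 hnot
    have hdisc : (PySem.Set.ofList rest).discard c
        = PySem.Set.ofList (rest.dropWhile (· == c)) := by
      conv_lhs => rw [← hsplit]
      exact pv_discard_ofList_append c _ _ hrun hnot
    have hcr : List.count c rest = (rest.takeWhile (· == c)).length := by
      conv_lhs => rw [← hsplit]
      rw [List.count_append, h1, h2]
      omega
    rw [pvRuns, ih hsub, PySem.Set.ofList_cons, hdisc, List.map_cons]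
    congr 1
    · have : (List.count c (c :: rest) : Int) = ((rest.takeWhile (· == c)).length : Int) + 1 := by
        rw [List.count_cons_self, hcr]
        push_cast
        ring
      rw [this]
    · apply List.map_congr_left
      intro d hd
      have hdmem : d ∈ rest.dropWhile (· == c) := (PySem.Set.mem_ofList _ d).1 hd
      have hdc : d ≠ c := fun h => hnot (h ▸ hdmem)
      have h0 : List.count d (rest.takeWhile (· == c)) = 0 :=
        List.count_eq_zero.2 (fun hmem => hdc (hrun d hmem))
      have hdr : List.count d rest = List.count d (rest.dropWhile (· == c)) := by
        conv_lhs => rw [← hsplit]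
        rw [List.count_append, h0, Nat.zero_add]
      have hcons : List.count d (c :: rest) = List.count d rest := by
        rw [List.count_cons]
        simp
        exact fun h => hdc h.symm
      rw [hcons, hdr]

-- the per-step transforms of B and A produce the same string
lemma az_step_eq (s : String) :
    PySem.Str.join "" (PySem.List.sorted
      ((pvRuns (PySem.List.sorted (s.toList.map (fun c => String.ofList [c])) (fun x => x) false)).map (fun p => p.1)
        ++ ((pvRuns (PySem.List.sorted (s.toList.map (fun c => String.ofList [c])) (fun x => x) false)).filter
              (fun p => decide (1 < p.2))).map (fun p => PySem.Int.toStr p.2))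
      (fun x => x) false)
  = PySem.Str.join "" (PySem.List.sorted
      (((List.filter (fun x => decide (1 < x)) (PySem.Dict.values (List.foldl
          (fun d x => PySem.Dict.insert d x (PySem.Dict.getD d x 0 + 1))
          (PySem.Dict.empty : PySem.Dict String Int)
          (s.toList.map (fun c => String.ofList [c]))))).map PySem.Int.toStr)
        ++ PySem.Dict.keys (List.foldl
          (fun d x => PySem.Dict.insert d x (PySem.Dict.getD d x 0 + 1))
          (PySem.Dict.empty : PySem.Dict String Int)
          (s.toList.map (fun c => String.ofList [c]))))
      (fun x => x) false) := by
  set digits := s.toList.map (fun c => String.ofList [c]) with hd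
  rw [PySem.Dict.foldl_insert_getD_add_one_eq_counter]
  congr 1
  apply PySem.List.sorted_eq_sorted_of_perm _ _ _ (fun _ _ h => h)
  set sd := PySem.List.sorted digits (fun x => x) false with hsd
  have hpair : sd.Pairwise (· ≤ ·) := PySem.List.sorted_pairwise digits (fun x => x)
  have hp : sd.Perm digits := PySem.List.sorted_perm digits (fun x => x) false
  have hcnt : ∀ d, List.count d sd = List.count d digits := fun d => hp.count_eq d
  have hK : (PySem.Set.ofList sd).Perm (PySem.Set.ofList digits) := by
    rw [List.perm_ext_iff_of_nodup (PySem.Set.nodup_ofList _) (PySem.Set.nodup_ofList _)]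
    intro a
    rw [PySem.Set.mem_ofList, PySem.Set.mem_ofList]
    exact hp.mem_iff
  have hV : PySem.Dict.values (PySem.Dict.counter digits)
      = (PySem.Set.ofList digits).map (fun k => ((List.count k digits : Nat) : Int)) := by
    show ((PySem.Dict.counter digits).items).map Prod.snd = _
    rw [PySem.Dict.items_counter, List.map_map]
    rfl
  rw [pvRuns_sorted_eq sd hpair, hV, PySem.Dict.keys_counter]
  rw [List.filter_map, List.filter_map, List.map_map, List.map_map, List.map_map]
  simp only [Function.comp_def]
  have hfun1 : (fun d => decide (1 < (List.count d sd : Int)))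
      = (fun d => decide (1 < (List.count d digits : Int))) := by
    funext d; rw [hcnt d]
  have hfun2 : (fun d => PySem.Int.toStr (List.count d sd : Int))
      = (fun d => PySem.Int.toStr (List.count d digits : Int)) := by
    funext d; rw [hcnt d]
  rw [List.map_id', hfun1, hfun2]
  exact (List.Perm.append hK ((hK.filter _).map _)).trans List.perm_append_comm

-- the two iterations agree for every fuel
lemma az_go_eq : ∀ (fuel : Nat) (s : String),
    algorythm_zip_go fuel s = algorythm_zip_alt_go fuel s := by
  intro fuel
  induction fuel with
  | zero => intro s; rfl
  | succ n ih =>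
    intro s
    have hstep := az_step_eq s
    simp only [algorythm_zip_go, algorythm_zip_alt_go]
    simp only [] at hstep ⊢
    rw [hstep]
    by_cases h : s = PySem.Str.join ""
        (PySem.List.sorted
          ((List.filter (fun x => decide (1 < x))
              (PySem.Dict.values (List.foldl
                (fun d x => PySem.Dict.insert d x (PySem.Dict.getD d x 0 + 1))
                (PySem.Dict.empty : PySem.Dict String Int)
                (s.toList.map (fun c => String.ofList [c]))))).map PySem.Int.toStr
            ++ PySem.Dict.keys (List.foldl
                (fun d x => PySem.Dict.insert d x (PySem.Dict.getD d x 0 + 1))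
                (PySem.Dict.empty : PySem.Dict String Int)
                (s.toList.map (fun c => String.ofList [c])))) (fun x => x) false)
    · rw [if_pos h, if_pos h.symm]
    · rw [if_neg h, if_neg (fun hh => h hh.symm)]
      exact ih _

-- ===== VERDICT (by name: the statement is the Claim_ definition above) =====
theorem algorythm_zip_spec : Claim_equal_algorythm_zip := by
  intro number _
  show algorythm_zip number = algorythm_zip_alt number
  exact az_go_eq _ number
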